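-- pv_equiv track=rewrite | github.com/xxEBxx/CP | contest/b.py | pal
-- ===== SOURCE A (Python) =====
-- def ppalindrom(d):
--     sum=0
--     for i in d:
--         sum+=d[i]
--     if sum%2==0:
--         for i in d:
--             if d[i]%2==1:
--                 return 0
--         return 1
--     return 0
--
-- def ipalindrom(d):
--     imp=0
--     sum=0
--     for i in d:
--         sum+=d[i]
--     if sum%2==1:
--         for i in d:
--             if d[i] % 2 != 0:
--                 if imp == 0:
--                     imp = 1
--                 else:
--                     return 0
--         return 1
--     return 0
--
-- def palindrom(d):
--     return ppalindrom(d) or ipalindrom(d)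
--
-- def pal(d, k):
--     while not palindrom(d) and k>0:
--         for i in d:
--             if d[i]%2==1:
--                 d[i]-=1
--                 k-=1
--                 break
--
--     if ipalindrom(d) and k>=0:
--             return 1
--     elif ppalindrom(d) and k>=0 and k%2==0:
--         return 1
--     return 0
-- ===== SOURCE B (Python) =====
-- def pal(d, k):
--     # Note: unlike A, this implementation does not mutate d.
--     odds = sum(1 for v in d.values() if v % 2 == 1)
--     t = min(odds - 1, k) if odds > 1 and k > 0 else 0
--     odds -= t
--     k -= t
--     if odds == 1 and k >= 0:
--         return 1
--     if odds == 0 and k >= 0 and k % 2 == 0: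
--         return 1
--     return 0
-- ===== Notes on version B (the rewrite author's own statement) =====
-- stated objective: faster
-- what changed: A repeatedly rescans the whole dict (two palindromability passes per single decrement, up to min(odds-1,k) times); B counts odd values in one pass, computes the number of decrement steps t = min(odds-1,k) in closed form and evaluates the final parity test analytically, without mutating d.
import Mathlib
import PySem

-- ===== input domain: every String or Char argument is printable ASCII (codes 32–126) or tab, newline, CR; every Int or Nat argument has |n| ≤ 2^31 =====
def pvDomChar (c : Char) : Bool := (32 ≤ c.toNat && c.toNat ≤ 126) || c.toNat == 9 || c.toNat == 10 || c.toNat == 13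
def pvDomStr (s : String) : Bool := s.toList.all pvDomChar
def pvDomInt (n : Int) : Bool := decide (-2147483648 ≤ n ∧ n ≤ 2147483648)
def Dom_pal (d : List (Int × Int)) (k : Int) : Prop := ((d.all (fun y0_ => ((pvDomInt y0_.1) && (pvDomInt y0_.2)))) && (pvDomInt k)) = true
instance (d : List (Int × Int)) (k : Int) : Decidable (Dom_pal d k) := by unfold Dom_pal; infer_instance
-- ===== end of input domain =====

-- B replaces A's repeated full-palindromability rescans (one decrement per rescan) by a single
-- odd-count pass and a closed-form step count; equivalence is about the RETURN value only
-- (Python A mutates its dict argument in place, B does not).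

-- ===== PORT A =====
-- d[i] for i drawn from d's keys is ported as getD i 0 (the key is present, so the default is never used)
def ppalindrom (d : PySem.Dict Int Int) : Int :=
  let sum := d.keys.foldl (fun s i => s + d.getD i 0) 0
  if PySem.Int.mod sum 2 = 0 then
    if d.keys.any (fun i => PySem.Int.mod (d.getD i 0) 2 == 1) then 0 else 1
  else 0

def ipalLoop (d : PySem.Dict Int Int) : List Int → Int → Int
  | [], _ => 1
  | i :: rest, imp =>
    if PySem.Int.mod (d.getD i 0) 2 ≠ 0 then
      if imp = 0 then ipalLoop d rest 1 else 0
    else ipalLoop d rest imp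

def ipalindrom (d : PySem.Dict Int Int) : Int :=
  let sum := d.keys.foldl (fun s i => s + d.getD i 0) 0
  if PySem.Int.mod sum 2 = 1 then ipalLoop d d.keys 0 else 0

def palindrom (d : PySem.Dict Int Int) : Int :=
  if ppalindrom d ≠ 0 then ppalindrom d else ipalindrom d

-- the 'none' branch is unreachable (palindrom d = 0 forces an odd value to exist);
-- there Python's while loop would never terminate, so any value is faithful
def palLoop (d : PySem.Dict Int Int) (k : Int) : PySem.Dict Int Int × Int :=
  if _h : palindrom d = 0 ∧ 0 < k then
    match d.keys.find? (fun i => PySem.Int.mod (d.getD i 0) 2 == 1) with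
    | some i => palLoop (d.modify i 0 (fun v => v - 1)) (k - 1)
    | none => (d, k)
  else (d, k)
termination_by k.toNat
decreasing_by omega

def pal (d : List (Int × Int)) (k : Int) : Int :=
  let dd := PySem.Dict.ofList d
  let r := palLoop dd k
  if ipalindrom r.1 ≠ 0 ∧ r.2 ≥ 0 then 1
  else if ppalindrom r.1 ≠ 0 ∧ r.2 ≥ 0 ∧ PySem.Int.mod r.2 2 = 0 then 1
  else 0

-- ===== PORT B =====
def pal_alt (d : List (Int × Int)) (k : Int) : Int :=
  let dd := PySem.Dict.ofList d
  let odds : Int := dd.values.foldl (fun c v => if PySem.Int.mod v 2 = 1 then c + 1 else c) 0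
  let t : Int := if 1 < odds ∧ 0 < k then min (odds - 1) k else 0
  let odds2 := odds - t
  let k2 := k - t
  if odds2 = 1 ∧ k2 ≥ 0 then 1
  else if odds2 = 0 ∧ k2 ≥ 0 ∧ PySem.Int.mod k2 2 = 0 then 1
  else 0

-- ===== PRECONDITION & SPEC =====
def Spec_pal (d : List (Int × Int)) (k : Int) (out : Int) : Prop := out = pal_alt d k
instance (d : List (Int × Int)) (k : Int) (out : Int) : Decidable (Spec_pal d k out) := by unfold Spec_pal; infer_instance

-- ===== CLAIM (what is proved, stated in full; the proofs are below) =====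
def Claim_equal_pal : Prop := ∀ (d : List (Int × Int)) (k : Int), Dom_pal d k → Spec_pal d k (pal d k)

-- ===== LEMMAS AND PROOFS =====

def oddB (v : Int) : Bool := decide (PySem.Int.mod v 2 = 1)

def kOdds (d : PySem.Dict Int Int) : Nat := d.keys.countP (fun i => oddB (d.getD i 0))

def tval (o k : Int) : Int := if 2 ≤ o ∧ 0 < k then min (o - 1) k else 0

lemma mod2 (a : Int) : PySem.Int.mod a 2 = a % 2 :=
  PySem.Int.mod_eq_emod_of_pos (by norm_num)

lemma mod_sub_one (v : Int) (h : PySem.Int.mod v 2 = 1) : PySem.Int.mod (v - 1) 2 = 0 := by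
  rw [mod2] at h ⊢; omega

lemma oddB_iff (v : Int) : oddB v = true ↔ v % 2 = 1 := by
  simp [oddB]

lemma oddB_false_iff (v : Int) : oddB v = false ↔ v % 2 = 0 := by
  rw [Bool.eq_false_iff, Ne, oddB_iff]; omega

lemma sum_parity (vs : List Int) :
    PySem.Int.mod vs.sum 2 = PySem.Int.mod (vs.countP oddB : Int) 2 := by
  induction vs with
  | nil => rfl
  | cons v t ih =>
    simp only [mod2] at ih ⊢
    rw [List.sum_cons, List.countP_cons]
    by_cases ho : oddB v
    · have hv : v % 2 = 1 := (oddB_iff v).mp ho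
      simp only [ho, if_pos]
      push_cast
      omega
    · have hv : v % 2 = 0 := (oddB_false_iff v).mp (Bool.eq_false_iff.mpr ho)
      simp only [ho]
      push_cast
      omega

lemma values_countP (d : PySem.Dict Int Int) (h : d.keys.Nodup) :
    d.values.countP oddB = kOdds d := by
  obtain ⟨l⟩ := d
  unfold kOdds
  induction l with
  | nil => rfl
  | cons p t ih =>
    rw [PySem.Dict.keys_mk] at h ⊢
    rw [PySem.Dict.values_mk]
    simp only [List.map_cons, List.countP_cons, List.nodup_cons] at h ⊢
    have hhead : (PySem.Dict.mk (p :: t)).getD p.1 0 = p.2 := by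
      rw [PySem.Dict.getD_eq_get?_getD, PySem.Dict.get?_mk_cons]
      simp
    have htail : ∀ i ∈ t.map (fun x => x.1),
        (PySem.Dict.mk (p :: t)).getD i 0 = (PySem.Dict.mk t).getD i 0 := by
      intro i hi
      have hne : (p.1 == i) = false := by
        simp only [beq_eq_false_iff_ne, ne_eq]
        intro he; exact h.1 (he ▸ hi)
      rw [PySem.Dict.getD_eq_get?_getD, PySem.Dict.get?_mk_cons, hne]
      simp only [Bool.false_eq_true, if_false]
      rw [← PySem.Dict.getD_eq_get?_getD]
    have hmid : List.countP (fun i => oddB ((PySem.Dict.mk (p :: t)).getD i 0)) (t.map (fun x => x.1))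
        = List.countP (fun i => oddB ((PySem.Dict.mk t).getD i 0)) (t.map (fun x => x.1)) :=
      List.countP_congr (fun i hi => by rw [htail i hi])
    have hih := ih h.2
    rw [PySem.Dict.values_mk, PySem.Dict.keys_mk] at hih
    rw [hhead, hmid, hih]

lemma sumfold_eq (d : PySem.Dict Int Int) :
    d.keys.foldl (fun s i => s + d.getD i 0) 0 = (d.keys.map (fun i => d.getD i 0)).sum := by
  rw [PySem.List.foldl_add]; simp

lemma sumfold_parity (d : PySem.Dict Int Int) :
    PySem.Int.mod (d.keys.foldl (fun s i => s + d.getD i 0) 0) 2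
      = PySem.Int.mod ((kOdds d : Int)) 2 := by
  rw [sumfold_eq, sum_parity, List.countP_map]; rfl

lemma ppalindrom_eq (d : PySem.Dict Int Int) :
    ppalindrom d = if kOdds d = 0 then 1 else 0 := by
  have hany : (d.keys.any fun i => PySem.Int.mod (d.getD i 0) 2 == 1) = !decide (kOdds d = 0) := by
    rcases Nat.eq_zero_or_pos (kOdds d) with h0 | h0
    · rw [h0]
      simp only [decide_true, Bool.not_true, List.any_eq_false]
      intro i hi
      have hni := List.countP_eq_zero.mp h0 i hi
      simp only [Bool.not_eq_true] at hni
      have := (oddB_false_iff _).mp hni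
      simp only [beq_iff_eq, mod2]
      omega
    · have h0' : kOdds d ≠ 0 := by omega
      simp only [h0', decide_false, Bool.not_false]
      obtain ⟨i, hi, hoi⟩ := List.countP_pos_iff.mp h0
      refine List.any_eq_true.mpr ⟨i, hi, ?_⟩
      simp only [beq_iff_eq, mod2]
      exact (oddB_iff _).mp hoi
  show (if PySem.Int.mod (d.keys.foldl (fun s i => s + d.getD i 0) 0) 2 = 0 then
      if (d.keys.any fun i => PySem.Int.mod (d.getD i 0) 2 == 1) = true then 0 else 1 else 0)
      = if kOdds d = 0 then 1 else 0
  rw [sumfold_parity, hany]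
  rcases Nat.eq_zero_or_pos (kOdds d) with h0 | h0
  · rw [h0]
    norm_num [mod2]
  · have h0' : kOdds d ≠ 0 := by omega
    rw [mod2]
    rcases Int.emod_two_eq_zero_or_one (kOdds d : Int) with hm | hm <;> rw [hm] <;> simp [h0']

lemma ipalLoop_eq (d : PySem.Dict Int Int) (l : List Int) : ∀ (imp : Int), imp = 0 ∨ imp = 1 →
    ipalLoop d l imp = if (l.countP (fun i => oddB (d.getD i 0)) : Int) ≤ 1 - imp then 1 else 0 := by
  induction l with
  | nil => intro imp h; rcases h with h | h <;> simp [ipalLoop, h]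
  | cons i rest ih =>
    intro imp h
    rw [ipalLoop, List.countP_cons]
    rcases PySem.Int.mod_two_eq (d.getD i 0) with hm | hm
    · have hb : oddB (d.getD i 0) = false := by rw [oddB_false_iff, ← mod2, hm]
      rw [hm, hb]
      simp only [ne_eq, not_true_eq_false, if_false, Bool.false_eq_true, add_zero]
      exact ih imp h
    · have hb : oddB (d.getD i 0) = true := by rw [oddB_iff, ← mod2, hm]
      rw [hm, hb]
      rw [if_pos (by norm_num : ¬ (1:Int) = 0)]
      rcases h with h | h
      · subst h
        rw [if_pos rfl, ih 1 (Or.inr rfl)]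
        have hiff : ((rest.countP (fun j => oddB (d.getD j 0)) + (if (true:Bool) = true then 1 else 0) : Nat) : Int) ≤ 1 - 0
            ↔ ((rest.countP (fun j => oddB (d.getD j 0)) : Nat) : Int) ≤ 1 - 1 := by
          simp only [if_pos]
          push_cast
          omega
        rw [if_congr hiff rfl rfl]
      · subst h
        rw [if_neg (by norm_num : ¬ (1:Int) = 0)]
        rw [if_neg (by simp only [if_pos]; push_cast; omega)]

lemma ipalindrom_eq (d : PySem.Dict Int Int) :
    ipalindrom d = if kOdds d = 1 then 1 else 0 := by
  show (if PySem.Int.mod (d.keys.foldl (fun s i => s + d.getD i 0) 0) 2 = 1 then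
      ipalLoop d d.keys 0 else 0) = if kOdds d = 1 then 1 else 0
  rw [sumfold_parity, ipalLoop_eq d d.keys 0 (Or.inl rfl)]
  have hc : List.countP (fun i => oddB (d.getD i 0)) d.keys = kOdds d := rfl
  rw [hc, mod2]
  rcases Int.emod_two_eq_zero_or_one (kOdds d : Int) with hm | hm
  · rw [if_neg (by rw [hm]; norm_num)]
    rw [if_neg (by omega)]
  · rw [if_pos hm]
    have hiff : ((kOdds d : Int) ≤ 1 - 0) ↔ (kOdds d = 1) := by omega
    rw [if_congr hiff rfl rfl]

lemma palindrom_eq_zero_iff (d : PySem.Dict Int Int) :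
    palindrom d = 0 ↔ 2 ≤ kOdds d := by
  unfold palindrom
  rw [ppalindrom_eq, ipalindrom_eq]
  by_cases h0 : kOdds d = 0
  · simp [h0]
  · by_cases h1 : kOdds d = 1
    · simp [h1]
    · simp only [h1, ite_false]
      norm_num
      omega

lemma countP_update {α : Type} (l : List α) (i : α) (f g : α → Bool)
    (hl : l.Nodup) (hi : i ∈ l) (hne : ∀ j ∈ l, j ≠ i → g j = f j)
    (hfi : f i = true) (hgi : g i = false) :
    l.countP g + 1 = l.countP f := by
  induction l with
  | nil => cases hi
  | cons a t ih =>
    rw [List.nodup_cons] at hl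
    rw [List.countP_cons, List.countP_cons]
    by_cases ha : a = i
    · subst ha
      rw [hfi, hgi]
      have : t.countP g = t.countP f :=
        List.countP_congr (fun j hj => by
          rw [hne j (List.mem_cons_of_mem _ hj) (fun he => hl.1 (he ▸ hj))])
      simp [this]
    · have hit : i ∈ t := by
        rcases List.mem_cons.mp hi with h | h
        · exact absurd h.symm ha
        · exact h
      have hga : g a = f a := hne a List.mem_cons_self ha
      rw [hga]
      have := ih hl.2 hit (fun j hj hji => hne j (List.mem_cons_of_mem _ hj) hji)
      omega

lemma step_lemma (d : PySem.Dict Int Int) (i : Int) (h : d.keys.Nodup)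
    (hf : d.keys.find? (fun j => PySem.Int.mod (d.getD j 0) 2 == 1) = some i) :
    (d.modify i 0 (fun v => v - 1)).keys = d.keys ∧
    kOdds (d.modify i 0 (fun v => v - 1)) + 1 = kOdds d := by
  have hmem : i ∈ d.keys := List.mem_of_find?_eq_some hf
  have hodd : PySem.Int.mod (d.getD i 0) 2 = 1 := by
    have := List.find?_some hf
    simpa [mod2] using this
  have hkeys : (d.modify i 0 (fun v => v - 1)).keys = d.keys := by
    rw [PySem.Dict.keys_modify,
      PySem.Dict.keys_insert_of_contains _ _ ((PySem.Dict.contains_iff_mem_keys d i).mpr hmem)]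
  refine ⟨hkeys, ?_⟩
  unfold kOdds
  rw [hkeys]
  refine countP_update d.keys i _ _ h hmem ?_ ?_ ?_
  · intro j hj hji
    rw [PySem.Dict.getD_modify, if_neg hji]
  · rw [oddB_iff, ← mod2, hodd]
  · rw [PySem.Dict.getD_modify, if_pos rfl, oddB_false_iff, ← mod2, mod_sub_one _ hodd]

lemma find_exists (d : PySem.Dict Int Int) (h2 : 2 ≤ kOdds d) :
    ∃ i, d.keys.find? (fun j => PySem.Int.mod (d.getD j 0) 2 == 1) = some i := by
  have hpos : 0 < d.keys.countP (fun i => oddB (d.getD i 0)) := by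
    unfold kOdds at h2; omega
  obtain ⟨i, hi, hoi⟩ := List.countP_pos_iff.mp hpos
  have : (d.keys.find? (fun j => PySem.Int.mod (d.getD j 0) 2 == 1)).isSome := by
    refine List.find?_isSome.mpr ⟨i, hi, ?_⟩
    simp only [beq_iff_eq, mod2]
    exact (oddB_iff _).mp hoi
  exact Option.isSome_iff_exists.mp this

lemma palLoop_spec (n : Nat) : ∀ (d : PySem.Dict Int Int) (k : Int), k.toNat ≤ n → d.keys.Nodup →
    (palLoop d k).2 = k - tval (kOdds d) k ∧ ((palLoop d k).1).keys.Nodup ∧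
    ((kOdds (palLoop d k).1 : Int) = (kOdds d : Int) - tval (kOdds d) k) := by
  induction n with
  | zero =>
    intro d k hk hn
    have hk0 : ¬ 0 < k := by omega
    rw [palLoop, dif_neg (fun hc => hk0 hc.2)]
    dsimp only
    have ht : tval (kOdds d) k = 0 := by unfold tval; rw [if_neg (fun hc => hk0 hc.2)]
    rw [ht]
    exact ⟨by omega, hn, by omega⟩
  | succ n ih =>
    intro d k hk hn
    by_cases hc : palindrom d = 0 ∧ 0 < k
    · have h2 : 2 ≤ kOdds d := (palindrom_eq_zero_iff d).mp hc.1
      obtain ⟨i, hf⟩ := find_exists d h2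
      rw [palLoop, dif_pos hc, hf]
      obtain ⟨hkeys, hcount⟩ := step_lemma d i hn hf
      have hn2 : (d.modify i 0 (fun v => v - 1)).keys.Nodup := by rw [hkeys]; exact hn
      have hk2 : (k - 1).toNat ≤ n := by omega
      obtain ⟨e1, e2, e3⟩ := ih (d.modify i 0 (fun v => v - 1)) (k - 1) hk2 hn2
      have hco : (kOdds (d.modify i 0 (fun v => v - 1)) : Int) = (kOdds d : Int) - 1 := by
        omega
      have htv : tval (kOdds d) k = 1 + tval ((kOdds (d.modify i 0 (fun v => v - 1)) : Int)) (k - 1) := by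
        unfold tval
        rw [hco]
        split_ifs <;> omega
      refine ⟨?_, e2, ?_⟩
      · rw [e1, htv]; omega
      · rw [e3, htv, hco]; omega
    · rw [palLoop, dif_neg hc]
      dsimp only
      have ht : tval (kOdds d) k = 0 := by
        unfold tval
        rw [if_neg]
        intro hcc
        exact hc ⟨(palindrom_eq_zero_iff d).mpr (by omega), hcc.2⟩
      rw [ht]
      exact ⟨by omega, hn, by omega⟩

-- ===== VERDICT (by name: the statement is the Claim_ definition above) =====
theorem pal_spec : Claim_equal_pal := by
  intro d k _
  unfold Spec_pal pal pal_alt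
  dsimp only
  have hn : (PySem.Dict.ofList d).keys.Nodup := PySem.Dict.nodup_keys_ofList d
  have hodds : (PySem.Dict.ofList d).values.foldl
      (fun c v => if PySem.Int.mod v 2 = 1 then c + 1 else c) 0 = (kOdds (PySem.Dict.ofList d) : Int) := by
    rw [PySem.List.foldl_ite_add_one (fun v => PySem.Int.mod v 2 = 1) (PySem.Dict.ofList d).values 0]
    have hcv : List.countP (fun v => decide (PySem.Int.mod v 2 = 1)) (PySem.Dict.ofList d).values
        = (PySem.Dict.ofList d).values.countP oddB := rfl
    rw [hcv, values_countP _ hn]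
    omega
  rw [hodds]
  obtain ⟨e1, e2, e3⟩ := palLoop_spec k.toNat (PySem.Dict.ofList d) k le_rfl hn
  have htb : (if 1 < (kOdds (PySem.Dict.ofList d) : Int) ∧ 0 < k
        then min ((kOdds (PySem.Dict.ofList d) : Int) - 1) k else 0)
      = tval (kOdds (PySem.Dict.ofList d)) k := by
    unfold tval
    have hiff : (1 < (kOdds (PySem.Dict.ofList d) : Int) ∧ 0 < k)
        ↔ (2 ≤ (kOdds (PySem.Dict.ofList d) : Int) ∧ 0 < k) := by omega
    rw [if_congr hiff rfl rfl]
  rw [htb]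
  rw [ipalindrom_eq, ppalindrom_eq, e1]
  by_cases h1 : kOdds (palLoop (PySem.Dict.ofList d) k).1 = 1
  · have hb1 : (kOdds (PySem.Dict.ofList d) : Int) - tval (kOdds (PySem.Dict.ofList d)) k = 1 := by
      omega
    simp [h1, hb1]
  · have hb1 : ¬ ((kOdds (PySem.Dict.ofList d) : Int) - tval (kOdds (PySem.Dict.ofList d)) k = 1) := by
      omega
    by_cases h0 : kOdds (palLoop (PySem.Dict.ofList d) k).1 = 0
    · have hb0 : (kOdds (PySem.Dict.ofList d) : Int) - tval (kOdds (PySem.Dict.ofList d)) k = 0 := by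
        omega
      simp [h0, hb0]
    · have hb0 : ¬ ((kOdds (PySem.Dict.ofList d) : Int) - tval (kOdds (PySem.Dict.ofList d)) k = 0) := by
        omega
      simp [h0, hb0]
      rw [if_neg (fun hc => h1 hc.1), if_neg (fun hc => hb1 hc.1)]
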